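-- pv_equiv track=rewrite | github.com/yeager/zscaler-api-client | zscaler_api_client.py | _obfuscate_api_key
-- ===== SOURCE A (Python) =====
-- def _obfuscate_api_key(api_key: str, timestamp: str) -> str:
--     """Obfuscate API key for ZIA authentication."""
--     high = timestamp[-6:]
--     low = str(int(high) >> 1)
--
--     obf = ""
--     for i, char in enumerate(api_key):
--         if i < len(high):
--             obf += chr(ord(char) + ord(high[i]))
--         elif i < len(low) + len(high):
--             obf += chr(ord(char) + ord(low[i - len(high)]))
--         else:
--             obf += chr(ord(char) + ord(high[i - len(high) - len(low)]))
--
--     return obf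
-- ===== SOURCE B (Python) =====
-- def _obfuscate_api_key(api_key: str, timestamp: str) -> str:
--     """Obfuscate API key for ZIA authentication."""
--     # Staged encryption: cut the key into three consecutive segments and encrypt
--     # each segment against its own key string (high, low, high) with zip,
--     # concatenating the stage outputs; no per-character index arithmetic.
--     high = timestamp[-6:]
--     low = str(int(high) >> 1)
--     parts = []
--     pos = 0
--     for key in (high, low, high):
--         seg = api_key[pos:pos + len(key)]
--         parts.append(''.join(chr(ord(c) + ord(k)) for c, k in zip(seg, key)))
--         pos += len(seg)
--     return ''.join(parts)
-- ===== Notes on version B (the rewrite author's own statement) =====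
-- stated objective: alternative
-- what changed: B encrypts the key in three staged passes: it slices api_key into consecutive segments of len(high), len(low), len(high) and zips each segment with its own key string, concatenating the stage outputs, instead of A's single indexed loop with a three-way branch and offset arithmetic per character.
import Mathlib
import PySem

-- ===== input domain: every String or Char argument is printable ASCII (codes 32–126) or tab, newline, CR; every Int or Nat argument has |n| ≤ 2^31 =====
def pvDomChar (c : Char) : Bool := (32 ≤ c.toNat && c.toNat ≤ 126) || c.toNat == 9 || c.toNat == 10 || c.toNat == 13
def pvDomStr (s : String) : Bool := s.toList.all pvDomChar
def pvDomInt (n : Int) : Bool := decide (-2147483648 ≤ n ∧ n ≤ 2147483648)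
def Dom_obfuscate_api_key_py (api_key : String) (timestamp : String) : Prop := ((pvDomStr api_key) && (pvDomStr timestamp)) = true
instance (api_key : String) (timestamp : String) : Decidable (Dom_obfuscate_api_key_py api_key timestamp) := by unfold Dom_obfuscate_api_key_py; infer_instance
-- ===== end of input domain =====

-- B encrypts the key in three staged zip passes over consecutive slices instead of A's single
-- indexed loop with a per-character three-way branch (objective: alternative decomposition).
-- Return-value equivalence on Pre_ (A raises outside it).

-- shared helpers (both Pythons compute high and low identically):
-- high = timestamp[-6:]
def pvHigh (timestamp : String) : List Char := PySem.List.slice timestamp.toList (some (-6)) none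
-- low = str(int(high) >> 1); int() raising ValueError is outside Pre_, getD 0 arbitrary there
def pvLow (timestamp : String) : List Char :=
  PySem.Int.toChars (((PySem.Int.ofChars? (pvHigh timestamp)).getD 0) >>> (1 : Nat))
-- chr(ord(c) + ord(k)) (sum ≤ 252 on Dom, always a valid code point)
def pvShift (c k : Char) : Char := Char.ofNat (c.toNat + k.toNat)

-- ===== PORT A =====
-- loop: obf = ""; for i, char in enumerate(api_key): three-way branch on i.
-- high[i] etc. with the in-range nonnegative indices of Pre_ is List.getD (default unreachable on Pre_).
def obfuscate_api_key_py (api_key : String) (timestamp : String) : String :=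
  let high := pvHigh timestamp
  let low := pvLow timestamp
  let obf := (PySem.List.enumerate api_key.toList).foldl (fun acc p =>
    if p.1 < (high.length : Int) then
      acc ++ [pvShift p.2 (high.getD p.1.toNat ' ')]
    else if p.1 < (low.length : Int) + (high.length : Int) then
      acc ++ [pvShift p.2 (low.getD (p.1.toNat - high.length) ' ')]
    else
      acc ++ [pvShift p.2 (high.getD (p.1.toNat - high.length - low.length) ' ')]) []
  String.ofList obf

-- ===== PORT B =====
-- parts = []; pos = 0; for key in (high, low, high): seg = api_key[pos:pos+len(key)];
-- parts.append(zip-encrypted segment); pos += len(seg); return ''.join(parts).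
-- The slice api_key[pos:pos+len(key)] has nonnegative bounds, so it is drop-then-take (exact:
-- Python's clamping slice = clamping drop/take here).
def obfuscate_api_key_py_alt (api_key : String) (timestamp : String) : String :=
  let high := pvHigh timestamp
  let low := pvLow timestamp
  let st := [high, low, high].foldl (fun (st : List (List Char) × Nat) key =>
    let seg := (api_key.toList.drop st.2).take key.length
    (st.1 ++ [(seg.zip key).map (fun p => pvShift p.1 p.2)], st.2 + seg.length)) ([], 0)
  String.ofList st.1.flatten

-- ===== PRECONDITION & SPEC =====
-- Pre_ is exactly where A returns: int(timestamp[-6:]) parses (else ValueError) and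
-- api_key is no longer than len(high)+len(low)+len(high) (else IndexError).
def Pre_obfuscate_api_key_py (api_key : String) (timestamp : String) : Prop :=
  (PySem.Int.ofChars? (pvHigh timestamp)).isSome = true ∧
  api_key.toList.length ≤ (pvHigh timestamp).length + (pvLow timestamp).length + (pvHigh timestamp).length
instance (api_key : String) (timestamp : String) : Decidable (Pre_obfuscate_api_key_py api_key timestamp) := by
  unfold Pre_obfuscate_api_key_py; infer_instance

def pvWitness_obfuscate_api_key_py : String × String := ("abcdefghijklm", "20240131123456")

def Spec_obfuscate_api_key_py (api_key : String) (timestamp : String) (out : String) : Prop := out = obfuscate_api_key_py_alt api_key timestamp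
instance (api_key : String) (timestamp : String) (out : String) : Decidable (Spec_obfuscate_api_key_py api_key timestamp out) := by unfold Spec_obfuscate_api_key_py; infer_instance

-- ===== CLAIM (what is proved, stated in full; the proofs are below) =====
def Claim_equal_obfuscate_api_key_py : Prop := ∀ (api_key : String) (timestamp : String), Dom_obfuscate_api_key_py api_key timestamp → Pre_obfuscate_api_key_py api_key timestamp → Spec_obfuscate_api_key_py api_key timestamp (obfuscate_api_key_py api_key timestamp)

-- ===== LEMMAS AND PROOFS =====

-- the concatenated table h++l++h, read at k < total, matches A's three-way branch
theorem pv_table_eq (h l : List Char) (k : Nat) :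
    (h ++ l ++ h).getD k ' ' =
      if (k : Int) < (h.length : Int) then h.getD k ' '
      else if (k : Int) < (l.length : Int) + (h.length : Int) then l.getD (k - h.length) ' '
      else h.getD (k - h.length - l.length) ' ' := by
  simp only [List.getD_eq_getElem?_getD, List.append_assoc]
  split_ifs with h1 h2
  · rw [List.getElem?_append_left (by exact_mod_cast h1)]
  · rw [List.getElem?_append_right (by omega), List.getElem?_append_left (by omega)]
  · rw [List.getElem?_append_right (by omega), List.getElem?_append_right (by omega)]

-- zip truncates its first argument to the second's length by itself
theorem pv_zip_trunc {α β : Type} (ys : List α) (zs : List β) :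
    ys.zip zs = (ys.take zs.length).zip zs := by
  induction zs generalizing ys with
  | nil => simp
  | cons z zs ih =>
    cases ys with
    | nil => simp
    | cons y ys =>
      simp only [List.length_cons, List.take_succ_cons, List.zip_cons_cons]
      rw [← ih]

-- zipping against a concatenated list splits into two zips on take/drop
theorem pv_zip_split {α β : Type} (k : List β) (xs : List α) (rest : List β) :
    xs.zip (k ++ rest) = ((xs.take k.length).zip k) ++ ((xs.drop k.length).zip rest) := by
  induction k generalizing xs with
  | nil => simp
  | cons a k ih =>
    cases xs with
    | nil => simp
    | cons x xs => simp [List.zip_cons_cons, ih]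

-- dropping min a len is dropping a
theorem pv_drop_clamp {α : Type} (xs : List α) (a : Nat) :
    xs.drop (min a xs.length) = xs.drop a := by
  rcases le_total a xs.length with hle | hle
  · rw [min_eq_left hle]
  · rw [min_eq_right hle, List.drop_length, List.drop_eq_nil_of_le hle]

-- the enumerate-indexed map equals the plain zip map when the table is long enough
theorem pv_enum_eq_zip (xs shifts : List Char) (hle : xs.length ≤ shifts.length) :
    (PySem.List.enumerate xs).map (fun p => pvShift p.2 (shifts.getD p.1.toNat ' ')) =
      (xs.zip shifts).map (fun p => pvShift p.1 p.2) := by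
  apply List.ext_getElem
  · simp [PySem.List.length_enumerate]; omega
  · intro i h1 h2
    have hi : i < xs.length := by
      simpa [PySem.List.length_enumerate] using h1
    simp only [List.getElem_map, PySem.List.getElem_enumerate, List.getElem_zip,
      Int.zero_add, Int.toNat_natCast, List.getD_eq_getElem?_getD]
    rw [List.getElem?_eq_getElem (by omega)]
    simp

-- A's fold equals the zip-map against the concatenated table (needs the length bound)
theorem pv_A_eq (h l xs : List Char) (hlen : xs.length ≤ h.length + l.length + h.length) :
    (PySem.List.enumerate xs).foldl (fun acc p =>
      if p.1 < (h.length : Int) then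
        acc ++ [pvShift p.2 (h.getD p.1.toNat ' ')]
      else if p.1 < (l.length : Int) + (h.length : Int) then
        acc ++ [pvShift p.2 (l.getD (p.1.toNat - h.length) ' ')]
      else
        acc ++ [pvShift p.2 (h.getD (p.1.toNat - h.length - l.length) ' ')]) [] =
    (xs.zip (h ++ l ++ h)).map (fun p => pvShift p.1 p.2) := by
  rw [show (fun (acc : List Char) (p : Int × Char) =>
        if p.1 < (h.length : Int) then
          acc ++ [pvShift p.2 (h.getD p.1.toNat ' ')]
        else if p.1 < (l.length : Int) + (h.length : Int) then
          acc ++ [pvShift p.2 (l.getD (p.1.toNat - h.length) ' ')]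
        else
          acc ++ [pvShift p.2 (h.getD (p.1.toNat - h.length - l.length) ' ')]) =
      (fun acc p => acc ++ [if p.1 < (h.length : Int) then
          pvShift p.2 (h.getD p.1.toNat ' ')
        else if p.1 < (l.length : Int) + (h.length : Int) then
          pvShift p.2 (l.getD (p.1.toNat - h.length) ' ')
        else
          pvShift p.2 (h.getD (p.1.toNat - h.length - l.length) ' ')])
      from funext fun acc => funext fun p => by split_ifs <;> rfl]
  rw [PySem.List.foldl_append_singleton_eq_map]
  simp only [List.nil_append]
  rw [show (PySem.List.enumerate xs).map (fun p =>
      if p.1 < (h.length : Int) then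
        pvShift p.2 (h.getD p.1.toNat ' ')
      else if p.1 < (l.length : Int) + (h.length : Int) then
        pvShift p.2 (l.getD (p.1.toNat - h.length) ' ')
      else
        pvShift p.2 (h.getD (p.1.toNat - h.length - l.length) ' ')) =
      (PySem.List.enumerate xs).map (fun p => pvShift p.2 ((h ++ l ++ h).getD p.1.toNat ' '))
    from List.map_congr_left fun p hp => by
      rw [PySem.List.mem_enumerate_iff] at hp
      obtain ⟨k, hk, rfl⟩ := hp
      simp only [Int.zero_add, Int.toNat_natCast]
      rw [pv_table_eq]
      split_ifs <;> rfl]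
  exact pv_enum_eq_zip xs (h ++ l ++ h) (by simp; omega)

-- B's three staged passes equal the same zip-map (unconditional: zip truncates)
theorem pv_B_eq (h l xs : List Char) :
    (([h, l, h].foldl (fun (st : List (List Char) × Nat) key =>
      let seg := (xs.drop st.2).take key.length
      (st.1 ++ [(seg.zip key).map (fun p => pvShift p.1 p.2)], st.2 + seg.length)) ([], 0)).1).flatten =
    (xs.zip (h ++ l ++ h)).map (fun p => pvShift p.1 p.2) := by
  simp only [List.foldl_cons, List.foldl_nil, List.nil_append, List.drop_zero]
  have hd1 : xs.drop (0 + (xs.take h.length).length) = xs.drop h.length := by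
    rw [List.length_take, Nat.zero_add, pv_drop_clamp]
  rw [hd1]
  have hd2 : xs.drop
      (0 + (xs.take h.length).length + ((xs.drop h.length).take l.length).length) =
      (xs.drop h.length).drop l.length := by
    rw [List.drop_drop, List.length_take, List.length_take, List.length_drop, Nat.zero_add,
      show min h.length xs.length + min l.length (xs.length - h.length) =
        min (h.length + l.length) xs.length from by omega,
      pv_drop_clamp]
  rw [hd2]
  simp only [List.flatten_append, List.flatten_cons, List.flatten_nil, List.append_nil,
    List.append_assoc]
  rw [pv_zip_split h xs (l ++ h), pv_zip_split l (xs.drop h.length) h]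
  simp only [List.map_append]
  rw [← pv_zip_trunc ((xs.drop h.length).drop l.length) h]

-- ===== VERDICT (by name: the statement is the Claim_ definition above) =====
set_option maxHeartbeats 1000000 in
theorem obfuscate_api_key_py_spec : Claim_equal_obfuscate_api_key_py := by
  intro api_key timestamp _ hpre
  obtain ⟨-, hlen⟩ := hpre
  unfold Spec_obfuscate_api_key_py obfuscate_api_key_py obfuscate_api_key_py_alt
  dsimp only
  refine congrArg String.ofList ?_
  rw [pv_A_eq _ _ _ hlen, ← pv_B_eq (pvHigh timestamp) (pvLow timestamp) api_key.toList]
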